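-- pv_equiv track=rewrite | github.com/the-tale/the-tale | src/the_tale/the_tale/game/navigation/logic.py | normalise_path
-- ===== SOURCE A (Python) =====
-- def normalise_path(path):
--     cells = set(path)
--
--     if len(cells) == len(path):
--         return path
--
--     reversed_path = path.copy()
--     reversed_path.reverse()
--
--     new_path = []
--
--     n = len(path)
--
--     i = 0
--
--     while i < n:
--         i = n - 1 - reversed_path.index(path[i])
--
--         new_path.append(path[i])
--
--         i += 1
--
--     return new_path
-- ===== SOURCE B (Python) =====
-- def normalise_path(path):
--     new_path = []
--     on_path = set()
--
--     for cell in path: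
--         if cell in on_path:
--             # close the loop: pop back to the previous visit of this cell
--             while new_path[-1] != cell:
--                 on_path.discard(new_path.pop())
--         else:
--             on_path.add(cell)
--             new_path.append(cell)
--
--     return new_path
-- ===== Notes on version B (the rewrite author's own statement) =====
-- stated objective: faster
-- what changed: B does chronological loop erasure with a stack and a membership set (on a revisit it pops back to the previous visit), a single amortised-linear pass, instead of A's repeated jumps to the last occurrence found by scanning a reversed copy with list.index.
import Mathlib
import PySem

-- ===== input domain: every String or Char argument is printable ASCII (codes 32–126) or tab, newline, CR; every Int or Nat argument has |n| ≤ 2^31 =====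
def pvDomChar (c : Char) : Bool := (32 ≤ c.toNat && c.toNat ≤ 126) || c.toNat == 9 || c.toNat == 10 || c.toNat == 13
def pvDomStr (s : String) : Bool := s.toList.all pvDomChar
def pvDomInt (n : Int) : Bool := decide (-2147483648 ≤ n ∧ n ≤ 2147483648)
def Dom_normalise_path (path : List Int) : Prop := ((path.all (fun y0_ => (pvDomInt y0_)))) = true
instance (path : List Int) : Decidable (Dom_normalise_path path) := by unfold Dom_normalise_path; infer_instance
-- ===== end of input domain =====

-- B replaces A's jump-to-last-occurrence loop (list.index scans of a reversed copy)
-- by chronological loop erasure: one pass with a stack and a membership set;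
-- return value only, neither version mutates its argument.

-- ===== PORT A =====
-- A's while loop; fuel = len(path) suffices since i strictly increases each pass.
-- The `none` fallbacks (IndexError/ValueError) are unreachable on real runs: they only
-- make the recursion total.
def pvLoopA (path rev : List Int) (n : Int) : Nat → Int → List Int → List Int
  | 0, _, acc => acc.reverse
  | fuel+1, i, acc =>
    if i < n then
      match PySem.List.pyGet? path i with
      | none => acc.reverse
      | some c =>
        match PySem.List.index? rev c with
        | none => acc.reverse
        | some j =>
          match PySem.List.pyGet? path (n - 1 - (j : Int)) with
          | none => acc.reverse
          | some c' => pvLoopA path rev n fuel (n - 1 - (j : Int) + 1) (c' :: acc)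
    else acc.reverse

def normalise_path (path : List Int) : List Int :=
  let cells := PySem.Set.ofList path
  if cells.length = path.length then path
  else
    let reversed_path := path.reverse
    pvLoopA path reversed_path (path.length : Int) path.length 0 []

-- ===== PORT B =====
-- Python's `while new_path[-1] != cell: on_path.discard(new_path.pop())`;
-- new_path is held top-first (appends/pops act on the head), so the function
-- returns it reversed at the end. The `[]` case is Python's IndexError on
-- new_path[-1]; it is unreachable because the loop only runs when cell is on the stack.
def pvPopTo (cell : Int) : List Int → PySem.Set Int → List Int × PySem.Set Int
  | [], s => ([], s)
  | x :: rest, s =>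
    if x = cell then (x :: rest, s) else pvPopTo cell rest (PySem.Set.discard s x)

-- one iteration of B's `for cell in path` body over the state (new_path, on_path)
def pvStepB (st : List Int × PySem.Set Int) (cell : Int) : List Int × PySem.Set Int :=
  if PySem.Set.contains st.2 cell then pvPopTo cell st.1 st.2
  else (cell :: st.1, PySem.Set.add st.2 cell)

def normalise_path_alt (path : List Int) : List Int :=
  (path.foldl pvStepB ([], PySem.Set.empty)).1.reverse

-- ===== PRECONDITION & SPEC =====
def Spec_normalise_path (path : List Int) (out : List Int) : Prop := out = normalise_path_alt path
instance (path : List Int) (out : List Int) : Decidable (Spec_normalise_path path out) := by unfold Spec_normalise_path; infer_instance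

-- ===== CLAIM (what is proved, stated in full; the proofs are below) =====
def Claim_equal_normalise_path : Prop := ∀ (path : List Int), Dom_normalise_path path → Spec_normalise_path path (normalise_path path)

-- ===== LEMMAS AND PROOFS =====

-- Common reference recursion: the first cell, then the normalisation of the
-- suffix after the LAST occurrence of that cell.
def pvAfterLast (c : Int) : List Int → List Int
  | [] => []
  | x :: xs => if c ∈ xs then pvAfterLast c xs else if x = c then xs else x :: xs

lemma pvAfterLast_length_le (c : Int) (l : List Int) : (pvAfterLast c l).length ≤ l.length := by
  induction l with
  | nil => simp [pvAfterLast]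
  | cons x xs ih =>
    simp only [pvAfterLast]
    split_ifs with h1 h2
    · exact le_trans ih (by simp)
    · simp
    · simp

def pvNormRec : List Int → List Int
  | [] => []
  | c :: rest => c :: pvNormRec (pvAfterLast c rest)
termination_by l => l.length
decreasing_by
  simpa using Nat.lt_succ_of_le (pvAfterLast_length_le c rest)

lemma pvAfterLast_of_not_mem {c : Int} {l : List Int} (h : c ∉ l) : pvAfterLast c l = l := by
  cases l with
  | nil => rfl
  | cons x xs =>
    have hx : x ≠ c := fun he => h (by simp [he])
    have hxs : c ∉ xs := fun hm => h (by simp [hm])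
    simp [pvAfterLast, hxs, hx]

lemma pvAfterLast_append {c : Int} (s t : List Int) (h : c ∉ t) :
    pvAfterLast c (s ++ c :: t) = t := by
  induction s with
  | nil => simp [pvAfterLast, h]
  | cons x xs ih =>
    have : c ∈ xs ++ c :: t := by simp
    simp [pvAfterLast, this, ih]

lemma pvNormRec_nodup : ∀ (l : List Int), l.Nodup → pvNormRec l = l := by
  intro l
  induction l using pvNormRec.induct with
  | case1 => intro _; rw [pvNormRec]
  | case2 c rest ih =>
    intro h
    rw [pvNormRec]
    have hc : c ∉ rest := (List.nodup_cons.mp h).1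
    rw [pvAfterLast_of_not_mem hc] at ih ⊢
    rw [ih (List.nodup_cons.mp h).2]

-- ---------- A = pvNormRec ----------

-- last-occurrence decomposition of a list containing c
lemma pvLastSplit {c : Int} : ∀ {l : List Int}, c ∈ l → ∃ s t, l = s ++ c :: t ∧ c ∉ t := by
  intro l
  induction l with
  | nil => simp
  | cons x xs ih =>
    intro hm
    by_cases hx : c ∈ xs
    · obtain ⟨s, t, he, hn⟩ := ih hx
      exact ⟨x :: s, t, by simp [he], hn⟩
    · have hxc : x = c := by
        rcases List.mem_cons.mp hm with h | h
        · exact h.symm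
        · exact absurd h hx
      exact ⟨[], xs, by simp [hxc], hx⟩

lemma pvLoopA_normRec (path : List Int) :
    ∀ (fuel : Nat) (i : Nat), path.length - i ≤ fuel → ∀ (acc : List Int),
      pvLoopA path path.reverse (path.length : Int) fuel (i : Int) acc
        = acc.reverse ++ pvNormRec (path.drop i) := by
  intro fuel
  induction fuel with
  | zero =>
    intro i hf acc
    have hle : path.length ≤ i := by omega
    simp [pvLoopA, List.drop_eq_nil_of_le hle, pvNormRec]
  | succ fuel ih =>
    intro i hf acc
    by_cases hin : i < path.length
    · have hi : (i : Int) < (path.length : Int) := by exact_mod_cast hin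
      have hget : PySem.List.pyGet? path (i : Int) = some path[i] := by
        simp [List.getElem?_eq_getElem hin]
      set c := path[i] with hc
      have hmem : c ∈ path.reverse := by
        simp [List.mem_reverse]; exact List.getElem_mem hin
      obtain ⟨j, hj⟩ := (PySem.List.index?_isSome_iff path.reverse c).mpr hmem |> Option.isSome_iff_exists.mp
      rw [PySem.List.index?_eq_some_iff] at hj
      obtain ⟨pre, suf, hsplit, hlen, hnpre⟩ := hj
      -- path = suf.reverse ++ c :: pre.reverse
      have hpath : path = suf.reverse ++ c :: pre.reverse := by
        have := congrArg List.reverse hsplit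
        simpa using this
      set p := suf.reverse.length with hp
      have hplen : p < path.length := by rw [hp, hpath]; simp
      have hpn : (path.length : Int) - 1 - (j : Int) = (p : Int) := by
        have h1 : path.length = p + 1 + pre.length := by
          rw [hp, hpath]; simp; omega
        have h2 : j = pre.length := hlen.symm
        rw [h1, h2]; push_cast; ring
      have hdropp : path.drop (p + 1) = pre.reverse := by
        rw [hpath]
        have : p + 1 = (suf.reverse ++ [c]).length := by simp [hp]
        rw [show suf.reverse ++ c :: pre.reverse = (suf.reverse ++ [c]) ++ pre.reverse by simp, this,
          List.drop_left]
      have hgetp : path[p]'hplen = c := by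
        rw [List.getElem_of_eq hpath, List.getElem_append_right (by omega)]
        simp [hp]
      have hip : i ≤ p := by
        by_contra hgt
        have hgt' : p < i := by omega
        have hpath2 : path = (suf.reverse ++ [c]) ++ pre.reverse := by
          rw [hpath]; simp
        have hlen2 : (suf.reverse ++ [c]).length ≤ i := by
          have hsr : p = suf.length := by simp [hp]
          simp
          omega
        have hmm : c ∈ pre.reverse := by
          rw [hc, List.getElem_of_eq hpath2, List.getElem_append_right hlen2]
          exact List.getElem_mem _
        exact hnpre (by simpa using hmm)
      have hgetp' : PySem.List.pyGet? path ((path.length : Int) - 1 - (j : Int)) = some c := by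
        rw [hpn]; simp [List.getElem?_eq_getElem hplen, hgetp]
      have hindex : PySem.List.index? path.reverse c = some j := by
        rw [PySem.List.index?_eq_some_iff]; exact ⟨pre, suf, hsplit, hlen, hnpre⟩
      rw [pvLoopA, if_pos hi, hget]
      dsimp only
      rw [hindex]
      dsimp only
      rw [hgetp']
      dsimp only
      have hcast : (path.length : Int) - 1 - (j : Int) + 1 = ((p + 1 : Nat) : Int) := by
        rw [hpn]; push_cast; ring
      rw [hcast, ih (p + 1) (by omega) (c :: acc)]
      -- now the normRec step
      have hdropi : path.drop i = c :: path.drop (i + 1) := by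
        rw [List.drop_eq_getElem_cons hin, hc]
      have hafter : pvAfterLast c (path.drop (i + 1)) = path.drop (p + 1) := by
        by_cases hpi : p = i
        · subst hpi
          rw [pvAfterLast_of_not_mem]
          rw [hdropp]
          intro hcm
          exact hnpre (by simpa using hcm)
        · have hlt : i + 1 ≤ p := by omega
          have hsplit2 : path.drop (i + 1) = (path.drop (i+1)).take (p - (i+1)) ++ c :: path.drop (p + 1) := by
            have h1 : path.drop p = c :: path.drop (p + 1) := by
              rw [List.drop_eq_getElem_cons hplen, hgetp]
            have h2 : (path.drop (i+1)).drop (p - (i+1)) = path.drop p := by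
              rw [List.drop_drop]; congr 1; omega
            conv_lhs => rw [← List.take_append_drop (p - (i+1)) (path.drop (i+1))]
            rw [h2, h1]
          rw [hsplit2, pvAfterLast_append]
          rw [hdropp]
          intro hcm
          exact hnpre (by simpa using hcm)
      rw [hdropi, pvNormRec, hafter]
      simp
    · have hi : ¬ ((i : Int) < (path.length : Int)) := by
        intro hlt; exact hin (by exact_mod_cast hlt)
      have hle : path.length ≤ i := by omega
      rw [pvLoopA, if_neg hi, List.drop_eq_nil_of_le hle, pvNormRec]
      simp

-- A's set-size test is exactly duplicate-freeness.
lemma pvNodup_of_setlen (l : List Int) (h : (PySem.Set.ofList l).length = l.length) : l.Nodup := by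
  have h1 : (PySem.Set.ofList l).Nodup := PySem.Set.nodup_ofList l
  have h2 : (PySem.Set.ofList l).toFinset = l.toFinset := by
    ext x; simp [PySem.Set.mem_ofList]
  have h3 : (PySem.Set.ofList l).length = l.toFinset.card := by
    rw [← h2, List.toFinset_card_of_nodup h1]
  have h4 : l.dedup.length = l.length := by
    rw [← List.card_toFinset, ← h3, h]
  have h5 : l.dedup = l := (List.dedup_sublist l).eq_of_length h4
  exact List.dedup_eq_self.mp h5

lemma pvA_eq_normRec (path : List Int) : normalise_path path = pvNormRec path := by
  unfold normalise_path
  by_cases hc : (PySem.Set.ofList path).length = path.length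
  · simp only [if_pos hc]
    exact (pvNormRec_nodup path (pvNodup_of_setlen path hc)).symm
  · simp only [if_neg hc]
    have := pvLoopA_normRec path path.length 0 (by omega) []
    simpa using this

-- ---------- B = pvNormRec ----------

-- stack-only model of B's step (the set component is exactly the stack's members)
def pvDropTo (c : Int) : List Int → List Int
  | [] => []
  | x :: xs => if x = c then x :: xs else pvDropTo c xs

def pvStepS (stack : List Int) (cell : Int) : List Int :=
  if cell ∈ stack then pvDropTo cell stack else cell :: stack

lemma pvDropTo_subset {c : Int} : ∀ {l : List Int} {x : Int}, x ∈ pvDropTo c l → x ∈ l := by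
  intro l
  induction l with
  | nil => intro x h; simp [pvDropTo] at h
  | cons y ys ih =>
    intro x h
    by_cases hy : y = c
    · simpa [pvDropTo, hy] using h
    · rw [pvDropTo, if_neg hy] at h
      exact List.mem_cons_of_mem _ (ih h)

-- bridge: B's fold equals the stack-only model
lemma pvPopTo_bridge {cell : Int} :
    ∀ (stack : List Int) (s : PySem.Set Int),
      (∀ x, x ∈ s ↔ x ∈ stack) → stack.Nodup → cell ∈ stack →
      (pvPopTo cell stack s).1 = pvDropTo cell stack ∧
      (∀ x, x ∈ (pvPopTo cell stack s).2 ↔ x ∈ pvDropTo cell stack) := by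
  intro stack
  induction stack with
  | nil => intro s _ _ h; simp at h
  | cons y ys ih =>
    intro s hs hnd hm
    by_cases hy : y = cell
    · refine ⟨?_, fun x => ?_⟩
      · rw [pvPopTo, pvDropTo]
        simp [hy]
      · rw [pvPopTo, pvDropTo]
        simp only [if_pos hy]
        exact hs x
    · have hm' : cell ∈ ys := by
        rcases List.mem_cons.mp hm with h | h
        · exact absurd h.symm hy
        · exact h
      have hnd' : ys.Nodup := (List.nodup_cons.mp hnd).2
      have hyny : y ∉ ys := (List.nodup_cons.mp hnd).1
      have hs' : ∀ x, x ∈ PySem.Set.discard s y ↔ x ∈ ys := by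
        intro x
        rw [PySem.Set.mem_discard, hs]
        constructor
        · rintro ⟨hx, hne⟩
          rcases List.mem_cons.mp hx with h | h
          · exact absurd h hne
          · exact h
        · intro hx
          exact ⟨List.mem_cons_of_mem _ hx, fun he => hyny (he ▸ hx)⟩
      rw [pvPopTo, pvDropTo]
      simp only [if_neg hy]
      exact ih (PySem.Set.discard s y) hs' hnd' hm'
  
lemma pvFoldB_bridge :
    ∀ (l : List Int) (stack : List Int) (s : PySem.Set Int),
      (∀ x, x ∈ s ↔ x ∈ stack) → stack.Nodup →
      (l.foldl pvStepB (stack, s)).1 = l.foldl pvStepS stack := by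
  intro l
  induction l with
  | nil => intro stack s _ _; rfl
  | cons cell rest ih =>
    intro stack s hs hnd
    rw [List.foldl_cons, List.foldl_cons]
    by_cases hm : cell ∈ stack
    · have hcont : PySem.Set.contains s cell = true := by
        rw [PySem.Set.contains_iff, hs]; exact hm
      obtain ⟨h1, h2⟩ := pvPopTo_bridge stack s hs hnd hm
      have hnd2 : (pvDropTo cell stack).Nodup := by
        -- pvDropTo returns a suffix; Nodup via sublist
        have : ∀ (st : List Int), st.Nodup → (pvDropTo cell st).Nodup := by
          intro st
          induction st with
          | nil => intro _; simp [pvDropTo]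
          | cons y ys ih2 =>
            intro h
            by_cases hy : y = cell
            · rw [pvDropTo, if_pos hy]; exact h
            · rw [pvDropTo, if_neg hy]; exact ih2 (List.nodup_cons.mp h).2
        exact this stack hnd
      have hstepB : pvStepB (stack, s) cell = pvPopTo cell stack s := by
        simp only [pvStepB]
        rw [if_pos hcont]
      have hpair : pvPopTo cell stack s = (pvDropTo cell stack, (pvPopTo cell stack s).2) := by
        rw [← h1]
      rw [hstepB, hpair, ih (pvDropTo cell stack) _ h2 hnd2]
      congr 1
      rw [pvStepS, if_pos hm]
    · have hcont : PySem.Set.contains s cell = false := by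
        rw [Bool.eq_false_iff]
        intro hcn
        exact hm ((hs cell).mp (PySem.Set.contains_iff s cell |>.mp hcn))
      have hstepB : pvStepB (stack, s) cell = (cell :: stack, PySem.Set.add s cell) := by
        simp only [pvStepB]
        rw [if_neg (by rw [hcont]; simp)]
      rw [hstepB, pvStepS, if_neg hm]
      exact ih (cell :: stack) (PySem.Set.add s cell)
        (by intro x; rw [PySem.Set.mem_add, hs]; simp [or_comm, eq_comm])
        (List.nodup_cons.mpr ⟨hm, hnd⟩)

-- model lemmas
lemma pvDropTo_append {c : Int} : ∀ {s : List Int} (t : List Int), c ∈ s →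
    pvDropTo c (s ++ t) = pvDropTo c s ++ t := by
  intro s
  induction s with
  | nil => intro t h; simp at h
  | cons x xs ih =>
    intro t h
    by_cases hx : x = c
    · simp [pvDropTo, hx]
    · have hcx : c ∈ xs := by
        rcases List.mem_cons.mp h with h' | h'
        · exact absurd h'.symm hx
        · exact h'
      simp [pvDropTo, hx, ih t hcx]

lemma pvDropTo_last {c : Int} : ∀ {s : List Int} (t : List Int), c ∉ s →
    pvDropTo c (s ++ c :: t) = c :: t := by
  intro s
  induction s with
  | nil => intro t _; simp [pvDropTo]
  | cons x xs ih =>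
    intro t h
    have hx : x ≠ c := fun he => h (by simp [he])
    have hxs : c ∉ xs := fun hm => h (by simp [hm])
    simp [pvDropTo, hx, ih t hxs]

-- running the model over l never disturbs a base stack disjoint from l
lemma pvRunS_base : ∀ (l : List Int) (s b : List Int), (∀ x ∈ l, x ∉ b) →
    l.foldl pvStepS (s ++ b) = l.foldl pvStepS s ++ b := by
  intro l
  induction l with
  | nil => intro s b _; rfl
  | cons cell rest ih =>
    intro s b hd
    have hcb : cell ∉ b := hd cell (by simp)
    rw [List.foldl_cons, List.foldl_cons]
    have hd' : ∀ x ∈ rest, x ∉ b := fun x hx => hd x (by simp [hx])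
    by_cases hm : cell ∈ s
    · have hm2 : cell ∈ s ++ b := by simp [hm]
      rw [pvStepS, if_pos hm2, pvStepS, if_pos hm, pvDropTo_append b hm]
      exact ih _ b hd'
    · have hm2 : cell ∉ s ++ b := by simp [hm, hcb]
      rw [pvStepS, if_neg hm2, pvStepS, if_neg hm]
      rw [show cell :: (s ++ b) = (cell :: s) ++ b by simp]
      exact ih _ b hd'

-- processing up to and including the last occurrence of c collapses the stack to [c]
lemma pvRunS_collapse {c : Int} : ∀ (mid : List Int) (s' : List Int), c ∉ s' →
    (mid ++ [c]).foldl pvStepS (s' ++ [c]) = [c] := by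
  intro mid
  induction mid with
  | nil =>
    intro s' h
    have hm : c ∈ s' ++ [c] := by simp
    simp only [List.nil_append, List.foldl_cons, List.foldl_nil]
    rw [pvStepS, if_pos hm, pvDropTo_last [] h]
  | cons x mid' ih =>
    intro s' h
    rw [List.cons_append, List.foldl_cons]
    by_cases hx : x = c
    · subst hx
      have hm : x ∈ s' ++ [x] := by simp
      rw [pvStepS, if_pos hm, pvDropTo_last [] h]
      simpa using ih [] (by simp)
    · by_cases hms : x ∈ s'
      · rw [pvStepS, if_pos (by simp [hms]), pvDropTo_append [c] hms]
        exact ih (pvDropTo x s') (fun hc => h (pvDropTo_subset hc))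
      · have hm2 : x ∉ s' ++ [c] := by simp [hms, hx]
        rw [pvStepS, if_neg hm2, show x :: (s' ++ [c]) = (x :: s') ++ [c] by simp]
        refine ih (x :: s') ?_
        simp only [List.mem_cons, not_or]
        exact ⟨fun he => hx he.symm, h⟩

lemma pvRunS_normRec : ∀ (n : Nat) (l : List Int), l.length ≤ n →
    (l.foldl pvStepS []).reverse = pvNormRec l := by
  intro n
  induction n with
  | zero =>
    intro l h
    have : l = [] := List.eq_nil_of_length_eq_zero (by omega)
    subst this
    rw [pvNormRec]
    rfl
  | succ n ih =>
    intro l h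
    cases l with
    | nil => rw [pvNormRec]; rfl
    | cons c rest =>
      rw [List.foldl_cons]
      have hstep : pvStepS [] c = [c] := by rw [pvStepS, if_neg (by simp)]
      rw [hstep, pvNormRec]
      by_cases hm : c ∈ rest
      · obtain ⟨s, t, hsplit, hnt⟩ := pvLastSplit hm
        have hlen : t.length ≤ n := by
          have := congrArg List.length hsplit
          simp at this ⊢
          simp at h
          omega
        rw [hsplit, show s ++ c :: t = (s ++ [c]) ++ t by simp, List.foldl_append]
        have hcol : (s ++ [c]).foldl pvStepS [c] = [c] := by
          have := pvRunS_collapse (c := c) s [] (by simp)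
          simpa using this
        rw [hcol]
        have hbase : t.foldl pvStepS ([] ++ [c]) = t.foldl pvStepS [] ++ [c] := by
          exact pvRunS_base t [] [c] (by intro x hx; simp; intro he; exact hnt (he ▸ hx))
        simp only [List.nil_append] at hbase
        rw [hbase, List.reverse_append]
        have hafter : pvAfterLast c (s ++ [c] ++ t) = t := by
          rw [show s ++ [c] ++ t = s ++ c :: t by simp]
          exact pvAfterLast_append s t hnt
        rw [hafter, ← ih t hlen]
        simp
      · have hbase : rest.foldl pvStepS ([] ++ [c]) = rest.foldl pvStepS [] ++ [c] := by
          exact pvRunS_base rest [] [c] (by intro x hx; simp; intro he; exact hm (he ▸ hx))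
        simp only [List.nil_append] at hbase
        rw [hbase, List.reverse_append]
        rw [pvAfterLast_of_not_mem hm, ← ih rest (by simp at h; omega)]
        simp

lemma pvB_eq_normRec (path : List Int) : normalise_path_alt path = pvNormRec path := by
  unfold normalise_path_alt
  rw [pvFoldB_bridge path [] PySem.Set.empty (by intro x; simp [PySem.Set.empty]) (by simp)]
  exact pvRunS_normRec path.length path (le_refl _)

-- ===== VERDICT (by name: the statement is the Claim_ definition above) =====
theorem normalise_path_spec : Claim_equal_normalise_path := by
  intro path _hdom
  unfold Spec_normalise_path
  rw [pvA_eq_normRec, pvB_eq_normRec]
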